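-- pv_equiv track=rewrite | github.com/AakaGoyal/cybersecproject | app.py | applicable_compliance
-- ===== SOURCE A (Python) =====
-- def applicable_compliance(tags:set):
--     hints=[]
--     if any(t in tags for t in ["geo:eu","geo:uk"]) or "data:pii" in tags or "data:employee" in tags:
--         hints.append(("GDPR","Regulation (EU/UK)","Likely applies if you process EU/UK personal data. Review DPAs and cross-border transfers."))
--     if "payments:card" in tags or "system:pos" in tags or "data:financial" in tags:
--         hints.append(("PCI DSS","Industry Standard","If you store/process/transmit card data. PSP-managed PoS may reduce scope."))
--     if "data:health" in tags:
--         hints.append(("HIPAA","US Regulation","Applies to US covered entities/business associates; otherwise treat as conditional."))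
--     hints.append(("ISO/IEC 27001","Standard","A clear maturity target and customer trust signal."))
--     return hints
-- ===== SOURCE B (Python) =====
-- _HINTS = [
--     ("GDPR", "Regulation (EU/UK)", "Likely applies if you process EU/UK personal data. Review DPAs and cross-border transfers."),
--     ("PCI DSS", "Industry Standard", "If you store/process/transmit card data. PSP-managed PoS may reduce scope."),
--     ("HIPAA", "US Regulation", "Applies to US covered entities/business associates; otherwise treat as conditional."),
-- ]
--
-- # inverted index: trigger tag -> index of the hint it fires
-- _TRIGGER = {
--     "geo:eu": 0, "geo:uk": 0, "data:pii": 0, "data:employee": 0,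
--     "payments:card": 1, "system:pos": 1, "data:financial": 1,
--     "data:health": 2,
-- }
--
-- def applicable_compliance(tags: set):
--     fired = {_TRIGGER[t] for t in tags if t in _TRIGGER}
--     return [hint for i, hint in enumerate(_HINTS) if i in fired] + [
--         ("ISO/IEC 27001", "Standard", "A clear maturity target and customer trust signal.")]
-- ===== Notes on version B (the rewrite author's own statement) =====
-- stated objective: alternative
-- what changed: Inverted the traversal: instead of testing each rule's trigger tags for membership in tags, B scans the input tags once through a precomputed trigger-tag->hint-index dictionary, collects the set of fired hint indices, and emits the hints whose index fired (ISO appended unconditionally).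
import Mathlib
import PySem

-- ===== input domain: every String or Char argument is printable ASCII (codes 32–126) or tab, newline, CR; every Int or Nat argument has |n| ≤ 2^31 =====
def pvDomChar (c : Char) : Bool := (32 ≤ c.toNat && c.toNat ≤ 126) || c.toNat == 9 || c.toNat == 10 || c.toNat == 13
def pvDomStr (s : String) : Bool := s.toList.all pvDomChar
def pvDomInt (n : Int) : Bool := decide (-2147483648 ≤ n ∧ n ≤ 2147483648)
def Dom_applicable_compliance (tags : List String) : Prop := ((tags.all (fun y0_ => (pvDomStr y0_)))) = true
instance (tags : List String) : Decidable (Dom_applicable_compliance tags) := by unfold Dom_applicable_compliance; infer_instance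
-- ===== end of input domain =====

-- B inverts the traversal: one pass over the input tags through a trigger-tag->hint-index dictionary
-- collecting the set of fired hint indices, then emitting the fired hints (alternative; same cost).


-- ===== PORT A =====
def applicable_compliance (tags : List String) : List (String × String × String) :=
  let hints : List (String × String × String) := []
  let hints := if (["geo:eu", "geo:uk"].any (fun t => tags.contains t))
                  || tags.contains "data:pii" || tags.contains "data:employee" then
      hints ++ [("GDPR", "Regulation (EU/UK)", "Likely applies if you process EU/UK personal data. Review DPAs and cross-border transfers.")]
    else hints
  let hints := if tags.contains "payments:card" || tags.contains "system:pos"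
                  || tags.contains "data:financial" then
      hints ++ [("PCI DSS", "Industry Standard", "If you store/process/transmit card data. PSP-managed PoS may reduce scope.")]
    else hints
  let hints := if tags.contains "data:health" then
      hints ++ [("HIPAA", "US Regulation", "Applies to US covered entities/business associates; otherwise treat as conditional.")]
    else hints
  hints ++ [("ISO/IEC 27001", "Standard", "A clear maturity target and customer trust signal.")]

-- ===== PORT B =====
def pvHints : List (String × String × String) :=
  [ ("GDPR", "Regulation (EU/UK)", "Likely applies if you process EU/UK personal data. Review DPAs and cross-border transfers."),
    ("PCI DSS", "Industry Standard", "If you store/process/transmit card data. PSP-managed PoS may reduce scope."),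
    ("HIPAA", "US Regulation", "Applies to US covered entities/business associates; otherwise treat as conditional.") ]

def pvTrigger : PySem.Dict String Int :=
  PySem.Dict.ofList
    [ ("geo:eu", 0), ("geo:uk", 0), ("data:pii", 0), ("data:employee", 0),
      ("payments:card", 1), ("system:pos", 1), ("data:financial", 1),
      ("data:health", 2) ]

-- the set comprehension {_TRIGGER[t] for t in tags if t in _TRIGGER}
def pvFired (tags : List String) : PySem.Set Int :=
  tags.foldl (fun s t => match PySem.Dict.get? pvTrigger t with
    | some i => PySem.Set.add s i
    | none => s) PySem.Set.empty

def applicable_compliance_alt (tags : List String) : List (String × String × String) :=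
  let fired := pvFired tags
  ((PySem.List.enumerate pvHints).filter (fun p => PySem.Set.contains fired p.1)).map (fun p => p.2)
    ++ [("ISO/IEC 27001", "Standard", "A clear maturity target and customer trust signal.")]

-- ===== PRECONDITION & SPEC =====
def Spec_applicable_compliance (tags : List String) (out : List (String × String × String)) : Prop := out = applicable_compliance_alt tags
instance (tags : List String) (out : List (String × String × String)) : Decidable (Spec_applicable_compliance tags out) := by unfold Spec_applicable_compliance; infer_instance

-- ===== CLAIM =====
def Claim_equal_applicable_compliance : Prop := ∀ (tags : List String), Dom_applicable_compliance tags → Spec_applicable_compliance tags (applicable_compliance tags)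

-- ===== LEMMAS AND PROOFS =====
theorem mem_pvFired_aux (tags : List String) (s : PySem.Set Int) (i : Int) :
    i ∈ tags.foldl (fun s t => match PySem.Dict.get? pvTrigger t with
      | some j => PySem.Set.add s j
      | none => s) s ↔ i ∈ s ∨ ∃ t ∈ tags, PySem.Dict.get? pvTrigger t = some i := by
  induction tags generalizing s with
  | nil => simp
  | cons hd tl ih =>
    simp only [List.foldl_cons]
    cases h : PySem.Dict.get? pvTrigger hd with
    | none =>
      rw [ih]
      constructor
      · rintro (hs | ⟨t, ht, hg⟩)
        · exact Or.inl hs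
        · exact Or.inr ⟨t, by simp [ht], hg⟩
      · rintro (hs | ⟨t, ht, hg⟩)
        · exact Or.inl hs
        · rcases List.mem_cons.mp ht with rfl | ht
          · rw [h] at hg; exact absurd hg (by simp)
          · exact Or.inr ⟨t, ht, hg⟩
    | some j =>
      rw [ih]
      simp only [PySem.Set.mem_add]
      constructor
      · rintro ((hs | rfl) | ⟨t, ht, hg⟩)
        · exact Or.inl hs
        · exact Or.inr ⟨hd, by simp, h⟩
        · exact Or.inr ⟨t, by simp [ht], hg⟩
      · rintro (hs | ⟨t, ht, hg⟩)
        · exact Or.inl (Or.inl hs)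
        · rcases List.mem_cons.mp ht with rfl | ht
          · rw [h] at hg; exact Or.inl (Or.inr (Option.some_injective _ hg).symm)
          · exact Or.inr ⟨t, ht, hg⟩

theorem mem_pvFired (tags : List String) (i : Int) :
    i ∈ pvFired tags ↔ ∃ t ∈ tags, PySem.Dict.get? pvTrigger t = some i := by
  unfold pvFired
  rw [mem_pvFired_aux]
  simp [PySem.Set.empty]

theorem trig_lookup (t : String) (i : Int) :
    PySem.Dict.get? pvTrigger t = some i ↔
      (i = 0 ∧ (t = "geo:eu" ∨ t = "geo:uk" ∨ t = "data:pii" ∨ t = "data:employee")) ∨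
      (i = 1 ∧ (t = "payments:card" ∨ t = "system:pos" ∨ t = "data:financial")) ∨
      (i = 2 ∧ t = "data:health") := by
  simp only [pvTrigger, PySem.Dict.ofList, PySem.Dict.update, List.foldl,
    PySem.Dict.get?_insert, PySem.Dict.get?_empty]
  split_ifs <;> simp_all <;> omega

theorem fired0 (tags : List String) :
    (0 : Int) ∈ pvFired tags ↔ ("geo:eu" ∈ tags ∨ "geo:uk" ∈ tags ∨ "data:pii" ∈ tags ∨ "data:employee" ∈ tags) := by
  simp [mem_pvFired, trig_lookup]; aesop

theorem fired1 (tags : List String) :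
    (1 : Int) ∈ pvFired tags ↔ ("payments:card" ∈ tags ∨ "system:pos" ∈ tags ∨ "data:financial" ∈ tags) := by
  simp [mem_pvFired, trig_lookup]; aesop

theorem fired2 (tags : List String) :
    (2 : Int) ∈ pvFired tags ↔ "data:health" ∈ tags := by
  simp [mem_pvFired, trig_lookup]

-- ===== VERDICT =====
theorem applicable_compliance_spec : Claim_equal_applicable_compliance := by
  intro tags _
  unfold Spec_applicable_compliance applicable_compliance applicable_compliance_alt pvHints
  simp only [PySem.List.enumerate, List.filter, List.any, Bool.or_false]
  by_cases h1 : "geo:eu" ∈ tags <;>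
  by_cases h2 : "geo:uk" ∈ tags <;>
  by_cases h3 : "data:pii" ∈ tags <;>
  by_cases h4 : "data:employee" ∈ tags <;>
  by_cases h5 : "payments:card" ∈ tags <;>
  by_cases h6 : "system:pos" ∈ tags <;>
  by_cases h7 : "data:financial" ∈ tags <;>
  by_cases h8 : "data:health" ∈ tags <;>
  simp [fired0, fired1, fired2, List.contains_eq_mem, h1, h2, h3, h4, h5, h6, h7, h8]
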